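-- pv_equiv track=rewrite | github.com/usey10/Algorithm_study | 백준/Silver/1972. 놀라운 문자열/놀라운 문자열.py | d_set
-- ===== SOURCE A (Python) =====
-- def d_set(d_str, d):
--     if d == 0:
--         str_set = set(i+j for i, j in zip(d_str[:-1], d_str[1:]))
--         return str_set
--
--     d_dict = {i:[] for i in range(d)}
--     for idx,j in enumerate(d_str):
--         d_dict[(idx+1)%d].append(j)
--     str_set = set()
--     for k,v in d_dict.items():
--         str_set = str_set | d_set(v,0)
--     return str_set
-- ===== SOURCE B (Python) =====
-- def d_set(d_str, d):
--     step = d if d != 0 else 1  # d == 0 asks for adjacent pairs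
--     return {a + b for a, b in zip(d_str, d_str[step:])}
-- ===== Notes on version B (the rewrite author's own statement) =====
-- stated objective: simpler
-- what changed: Replaces the residue-bucket dict plus per-bucket recursion with a single zip of the string against its d-shifted suffix (d==0 folded in as shift 1), one comprehension instead of two passes and a recursive call.
import Mathlib
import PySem

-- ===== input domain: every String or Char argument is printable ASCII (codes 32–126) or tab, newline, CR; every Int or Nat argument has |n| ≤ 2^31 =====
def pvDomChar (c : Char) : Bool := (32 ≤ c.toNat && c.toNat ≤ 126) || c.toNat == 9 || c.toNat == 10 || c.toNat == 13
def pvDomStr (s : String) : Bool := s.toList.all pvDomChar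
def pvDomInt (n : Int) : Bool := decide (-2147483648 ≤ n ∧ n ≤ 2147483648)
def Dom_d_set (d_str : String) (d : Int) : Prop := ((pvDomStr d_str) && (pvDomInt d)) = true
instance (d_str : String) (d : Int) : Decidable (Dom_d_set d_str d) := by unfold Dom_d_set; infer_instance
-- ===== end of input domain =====

-- B replaces A's residue-bucket dict + per-bucket recursion by one zip of the string with its
-- d-shifted suffix (objective: simpler). Python returns an unordered set; both ports return its
-- elements as the sorted list (the canonical List representation; outputs are compared as finite sets).

-- ===== PORT A =====
-- Literal transliteration of A. The recursive call d_set(v, 0) receives v, a list of 1-character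
-- strings; it is represented as 'String.ofList v' (exact: zip/+ behave identically on it).
-- 'd_dict[(idx+1)%d].append(j)' raises KeyError when the key is absent (only possible for d < 0
-- with a non-empty string, excluded by Pre_); Dict.modify is exact wherever the key is present.
def d_set (d_str : String) (d : Int) : List String :=
  if hd : d = 0 then
    PySem.List.sorted
      (PySem.Set.ofList
        ((List.zip (PySem.List.slice d_str.toList none (some (-1)))
                   (PySem.List.slice d_str.toList (some 1) none)).map
          (fun p => String.ofList [p.1, p.2]))) (fun x => x) false
  else
    let d0 : PySem.Dict Int (List Char) :=
      (PySem.List.pyRange 0 d).foldl (fun dd i => dd.insert i []) PySem.Dict.empty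
    let d1 : PySem.Dict Int (List Char) :=
      (PySem.List.enumerate d_str.toList).foldl
        (fun dd p => dd.modify (PySem.Int.mod (p.1 + 1) d) [] (fun v => v ++ [p.2])) d0
    PySem.List.sorted
      (d1.items.foldl (fun acc kv => PySem.Set.union acc (d_set (String.ofList kv.2) 0))
        PySem.Set.empty) (fun x => x) false
termination_by (if d = 0 then 0 else 1)
decreasing_by simp [hd]

-- ===== PORT B =====
-- Source B: step = d if d != 0 else 1; return {a + b for a, b in zip(d_str, d_str[step:])}
def d_set_alt (d_str : String) (d : Int) : List String :=
  let step : Int := if d ≠ 0 then d else 1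
  PySem.List.sorted
    (PySem.Set.ofList
      ((List.zip d_str.toList (PySem.List.slice d_str.toList (some step) none)).map
        (fun p => String.ofList [p.1, p.2]))) (fun x => x) false

-- ===== PRECONDITION & SPEC =====
-- Pre_ excludes only inputs where A raises: for d < 0 and a non-empty string, A's dict over
-- range(d) is empty and 'd_dict[(idx+1)%d]' raises KeyError. (d < 0 with the empty string is
-- admitted: A returns set() there.)
def Pre_d_set (d_str : String) (d : Int) : Prop := 0 ≤ d ∨ d_str = ""
instance (d_str : String) (d : Int) : Decidable (Pre_d_set d_str d) := by unfold Pre_d_set; infer_instance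
def pvWitness_d_set : String × Int := ("ab", 1)
def Spec_d_set (d_str : String) (d : Int) (out : List String) : Prop := out = d_set_alt d_str d
instance (d_str : String) (d : Int) (out : List String) : Decidable (Spec_d_set d_str d out) := by unfold Spec_d_set; infer_instance

-- ===== CLAIM (what is proved, stated in full; the proofs are below) =====
def Claim_equal_d_set : Prop := ∀ (d_str : String) (d : Int), Dom_d_set d_str d → Pre_d_set d_str d → Spec_d_set d_str d (d_set d_str d)

-- ===== LEMMAS AND PROOFS =====

-- zipping against the tail: dropping the last element of the left list changes nothing
lemma zip_dropLast_tail {α : Type} (l : List α) : List.zip l.dropLast l.tail = List.zip l l.tail := by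
  apply List.ext_getElem
  · simp
  · intro i h1 h2
    simp only [List.getElem_zip, List.getElem_dropLast]

-- membership in a fold of set unions
lemma mem_foldl_union {α β : Type} [BEq α] [LawfulBEq α] (l : List β) (q : β → PySem.Set α)
    (s : PySem.Set α) (x : α) :
    x ∈ l.foldl (fun acc kv => PySem.Set.union acc (q kv)) s ↔ x ∈ s ∨ ∃ kv ∈ l, x ∈ q kv := by
  induction l generalizing s with
  | nil => simp
  | cons h t ih => simp [ih, PySem.Set.mem_union, or_assoc]

lemma nodup_foldl_union {α β : Type} [BEq α] [LawfulBEq α] (l : List β) (q : β → PySem.Set α)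
    (s : PySem.Set α) (hs : s.Nodup) :
    (l.foldl (fun acc kv => PySem.Set.union acc (q kv)) s).Nodup := by
  induction l generalizing s with
  | nil => exact hs
  | cons h t ih => exact ih _ (PySem.Set.nodup_union _ _ hs)

-- Set.update by elements already present is the identity
lemma set_update_of_subset {α : Type} [BEq α] [LawfulBEq α] {xs : List α} {s : PySem.Set α}
    (h : ∀ x ∈ xs, x ∈ s) : PySem.Set.update s xs = s := by
  induction xs generalizing s with
  | nil => rfl
  | cons a t ih =>
      have ha : PySem.Set.add s a = s := by
        simp [PySem.Set.add, PySem.Set.contains, h a (by simp)]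
      show PySem.Set.update (PySem.Set.add s a) t = s
      rw [ha]; exact ih (fun x hx => h x (by simp [hx]))

-- adjacent pairs of a strictly increasing list
lemma mem_zip_tail_iff (l : List Int) (hp : l.Pairwise (· < ·)) (a b : Int) :
    (a, b) ∈ List.zip l l.tail ↔
      a ∈ l ∧ b ∈ l ∧ a < b ∧ ∀ x ∈ l, ¬ (a < x ∧ x < b) := by
  induction l with
  | nil => simp
  | cons h t ih =>
    match t, hp with
    | [], _ => simp; omega
    | h' :: t', hp =>
      have hph := List.pairwise_cons.mp hp
      have hh : ∀ x ∈ h' :: t', h < x := hph.1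
      have hp' : (h' :: t').Pairwise (· < ·) := hph.2
      have hh' : ∀ x ∈ t', h' < x := (List.pairwise_cons.mp hp').1
      have step : List.zip (h :: h' :: t') (h :: h' :: t').tail
          = (h, h') :: List.zip (h' :: t') (h' :: t').tail := by simp
      rw [step]
      constructor
      · intro hm
        rcases List.mem_cons.mp hm with heq | hm'
        · obtain ⟨rfl, rfl⟩ : a = h ∧ b = h' := Prod.ext_iff.mp heq
          refine ⟨by simp, by simp, hh b (by simp), ?_⟩
          intro x hx ⟨h1, h2⟩
          rcases List.mem_cons.mp hx with rfl | hx'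
          · omega
          · rcases List.mem_cons.mp hx' with rfl | hx''
            · omega
            · exact absurd (hh' x hx'') (by omega)
        · obtain ⟨ha, hb, hab, hno⟩ := (ih hp').mp hm'
          refine ⟨by simp [ha], by simp [hb], hab, ?_⟩
          intro x hx hc
          rcases List.mem_cons.mp hx with rfl | hx'
          · exact absurd (hh a ha) (by omega)
          · exact hno x hx' hc
      · rintro ⟨ha, hb, hab, hno⟩
        rcases List.mem_cons.mp ha with rfl | ha'
        · have hbne : b ≠ a := by omega
          have hb' : b ∈ h' :: t' := by
            rcases List.mem_cons.mp hb with h2 | h2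
            · exact absurd h2 hbne
            · exact h2
          have : b = h' := by
            rcases List.mem_cons.mp hb' with rfl | hb''
            · rfl
            · exact absurd (hno h' (by simp) ⟨hh h' (by simp), hh' b hb''⟩) (by simp)
          subst this
          exact List.mem_cons_self ..
        · have hbne : b ∈ h' :: t' := by
            rcases List.mem_cons.mp hb with rfl | h2
            · exact absurd (hh a ha') (by omega)
            · exact h2
          refine List.mem_cons.mpr (Or.inr ((ih hp').mpr ⟨ha', hbne, hab, ?_⟩))
          intro x hx hc
          exact hno x (by simp [hx]) hc

-- the residue chain of indices feeding bucket r
def pvChain (n d r : Int) : List Int :=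
  (PySem.List.pyRange 0 n).filter (fun j => PySem.Int.mod (j + 1) d == r)

lemma mem_pvChain (n d r j : Int) :
    j ∈ pvChain n d r ↔ 0 ≤ j ∧ j < n ∧ PySem.Int.mod (j + 1) d = r := by
  simp [pvChain, List.mem_filter, PySem.List.mem_pyRange_one, and_assoc]

lemma pairwise_pvChain (n d r : Int) : (pvChain n d r).Pairwise (· < ·) :=
  List.Pairwise.filter _ (PySem.List.pairwise_lt_pyRange_one 0 n)

-- the items of A's dict after both loops, for d > 0
lemma dict_items_char (cs : List Char) (d : Int) (hd : 0 < d) :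
    (((PySem.List.enumerate cs).foldl
        (fun dd p => dd.modify (PySem.Int.mod (p.1 + 1) d) [] (fun v => v ++ [p.2]))
        ((PySem.List.pyRange 0 d).foldl (fun dd i => dd.insert i []) PySem.Dict.empty)).items)
      = (PySem.List.pyRange 0 d).map
          (fun r => (r, (pvChain (PySem.List.len cs) d r).map (fun j => PySem.List.pyGetD cs j 'x'))) := by
  set d0 : PySem.Dict Int (List Char) :=
    (PySem.List.pyRange 0 d).foldl (fun dd i => dd.insert i []) PySem.Dict.empty with hd0
  have hitems0 : d0.items = (PySem.List.pyRange 0 d).map (fun r => (r, ([] : List Char))) := by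
    have := PySem.Dict.items_foldl_insert_fresh (PySem.List.pyRange 0 d) (fun i => i)
      (fun _ => ([] : List Char)) PySem.Dict.empty
      (by intro a _; exact PySem.Dict.contains_empty a)
      (by simpa using PySem.List.nodup_pyRange_one 0 d)
    simpa [PySem.Dict.empty] using this
  have hkeys0 : d0.keys = PySem.List.pyRange 0 d := by
    simp [PySem.Dict.keys, hitems0, Function.comp_def]
  set d1 : PySem.Dict Int (List Char) :=
    (PySem.List.enumerate cs).foldl
      (fun dd p => dd.modify (PySem.Int.mod (p.1 + 1) d) [] (fun v => v ++ [p.2])) d0 with hd1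
  have hkeys1 : d1.keys = PySem.List.pyRange 0 d := by
    rw [hd1, PySem.Dict.keys_foldl_modify_key (PySem.List.enumerate cs)
      (fun p => PySem.Int.mod (p.1 + 1) d) [] (fun _ p v => v ++ [p.2]) d0, hkeys0]
    apply set_update_of_subset
    intro x hx
    simp only [List.mem_map] at hx
    obtain ⟨p, _, rfl⟩ := hx
    exact PySem.List.mem_pyRange_one.mpr ⟨PySem.Int.mod_nonneg _ hd, PySem.Int.mod_lt _ hd⟩
  have hnd1 : d1.keys.Nodup := by rw [hkeys1]; exact PySem.List.nodup_pyRange_one 0 d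
  have hgetD : ∀ r : Int, d1.getD r [] =
      (pvChain (PySem.List.len cs) d r).map (fun j => PySem.List.pyGetD cs j 'x') := by
    intro r
    have hfold : d1 = ((PySem.List.enumerate cs).map
        (fun p => (PySem.Int.mod (p.1 + 1) d, p.2))).foldl
        (fun dd q => dd.modify q.1 [] (fun v => v ++ [q.2])) d0 := by
      rw [hd1, List.foldl_map]
    rw [hfold, PySem.Dict.getD_foldl_modify_append]
    have hD0 : d0.getD r [] = [] := by
      by_cases hr : r ∈ PySem.List.pyRange 0 d
      · have hmem : (r, ([] : List Char)) ∈ d0.items := by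
          rw [hitems0]; exact List.mem_map.mpr ⟨r, hr, rfl⟩
        exact PySem.Dict.getD_of_mem_items d0 hmem
          (by rw [hkeys0]; exact PySem.List.nodup_pyRange_one 0 d) []
      · refine PySem.Dict.getD_of_not_contains d0 [] ?_
        rw [PySem.Dict.contains_eq_decide_mem_keys, hkeys0]
        simpa using hr
    rw [hD0, List.nil_append]
    rw [PySem.List.enumerate_eq_map_pyRange cs 'x']
    simp only [List.filter_map, List.map_map, pvChain]
    congr 1
  have := PySem.Dict.items_eq_map_keys d1 hnd1 []
  rw [this, hkeys1]
  exact List.map_congr_left (fun r _ => by rw [hgetD r])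

-- membership in B's pair list, for d > 0
lemma mem_B_pairs (cs : List Char) (d : Int) (hd : 0 < d) (x : String) :
    (x ∈ (List.zip cs (PySem.List.slice cs (some d) none)).map (fun p => String.ofList [p.1, p.2])) ↔
      ∃ i : Int, 0 ≤ i ∧ i + d < PySem.List.len cs ∧
        x = String.ofList [PySem.List.pyGetD cs i 'x', PySem.List.pyGetD cs (i + d) 'x'] := by
  rw [PySem.List.slice_from cs (le_of_lt hd)]
  rw [List.mem_map]
  constructor
  · rintro ⟨p, hp, rfl⟩
    obtain ⟨k, hk, hpk⟩ := List.mem_iff_getElem.mp hp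
    have hklt : k < cs.length ∧ k < cs.length - d.toNat := by
      have := hk; simp [List.length_zip] at this; omega
    have hzip : (List.zip cs (cs.drop d.toNat))[k] = (cs[k]'(hklt.1), (cs.drop d.toNat)[k]'(by simpa using hklt.2)) := by
      simp [List.getElem_zip]
    refine ⟨(k : Int), by positivity, ?_, ?_⟩
    · simp only [PySem.List.len]
      have := hklt.2
      omega
    · rw [← hpk, hzip]
      have h1 : PySem.List.pyGetD cs (k : Int) 'x' = cs[k]'hklt.1 :=
        PySem.List.pyGetD_eq_getElem cs 'x' (by positivity) (by exact_mod_cast hklt.1)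
      have h2 : PySem.List.pyGetD cs ((k : Int) + d) 'x' = cs[d.toNat + k]'(by omega) := by
        have : ((k : Int) + d) = ((d.toNat + k : Nat) : Int) := by omega
        rw [this]
        exact PySem.List.pyGetD_eq_getElem cs 'x' (by positivity) (by exact_mod_cast (by omega : d.toNat + k < cs.length))
      rw [h1, h2]
      simp [List.getElem_drop]
  · rintro ⟨i, h0, hlt, rfl⟩
    simp only [PySem.List.len] at hlt
    have hkn : i.toNat + d.toNat < cs.length := by omega
    refine ⟨(cs[i.toNat]'(by omega), (cs.drop d.toNat)[i.toNat]'(by simp; omega)), ?_, ?_⟩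
    · rw [List.mem_iff_getElem]
      refine ⟨i.toNat, by simp [List.length_zip]; omega, ?_⟩
      simp [List.getElem_zip]
    · have h1 : PySem.List.pyGetD cs i 'x' = cs[i.toNat]'(by omega) :=
        PySem.List.pyGetD_eq_getElem cs 'x' h0 (by omega)
      have h2 : PySem.List.pyGetD cs (i + d) 'x' = cs[d.toNat + i.toNat]'(by omega) := by
        have : (i + d) = ((d.toNat + i.toNat : Nat) : Int) := by omega
        rw [this]
        exact PySem.List.pyGetD_eq_getElem cs 'x' (by positivity) (by exact_mod_cast (by omega : d.toNat + i.toNat < cs.length))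
      rw [h1, h2]
      simp [List.getElem_drop]

-- membership in A's result set, for d > 0
lemma mem_A_set (cs : List Char) (d : Int) (hd : 0 < d) (x : String) :
    (x ∈ ((((PySem.List.enumerate cs).foldl
        (fun dd p => dd.modify (PySem.Int.mod (p.1 + 1) d) [] (fun v => v ++ [p.2]))
        ((PySem.List.pyRange 0 d).foldl (fun dd i => dd.insert i []) PySem.Dict.empty)).items).foldl
        (fun acc kv => PySem.Set.union acc (d_set (String.ofList kv.2) 0)) PySem.Set.empty)) ↔
      ∃ i : Int, 0 ≤ i ∧ i + d < PySem.List.len cs ∧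
        x = String.ofList [PySem.List.pyGetD cs i 'x', PySem.List.pyGetD cs (i + d) 'x'] := by
  have hz : ∀ v : List Char, d_set (String.ofList v) 0 =
      PySem.List.sorted (PySem.Set.ofList ((List.zip v v.tail).map
        (fun p => String.ofList [p.1, p.2]))) (fun y => y) false := by
    intro v
    rw [d_set]
    simp [PySem.List.slice_to_neg_one, PySem.List.slice_from_one, zip_dropLast_tail]
  have hmodshift : ∀ a : Int, PySem.Int.mod (a + d + 1) d = PySem.Int.mod (a + 1) d := by
    intro a
    rw [PySem.Int.mod_eq_emod_of_pos hd, PySem.Int.mod_eq_emod_of_pos hd]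
    have h : a + d + 1 = (a + 1) + d := by ring
    rw [h, Int.add_emod_right]
  have hcong : ∀ a b : Int, PySem.Int.mod (a + 1) d = PySem.Int.mod (b + 1) d → d ∣ b - a := by
    intro a b h
    rw [PySem.Int.mod_eq_emod_of_pos hd, PySem.Int.mod_eq_emod_of_pos hd] at h
    have h2 := Int.emod_eq_emod_iff_emod_sub_eq_zero.mp h
    have h3 : (a + 1) - (b + 1) = a - b := by ring
    rw [h3] at h2
    have h4 : d ∣ a - b := Int.dvd_of_emod_eq_zero h2
    have h5 : d ∣ -(a - b) := dvd_neg.mpr h4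
    rwa [neg_sub] at h5
  set n := PySem.List.len cs with hnn
  rw [mem_foldl_union]
  rw [dict_items_char cs d hd]
  constructor
  · rintro (hemp | ⟨kv, hkv, hx⟩)
    · simp [PySem.Set.empty] at hemp
    · obtain ⟨r, hr, rfl⟩ := List.mem_map.mp hkv
      rw [hz] at hx
      rw [PySem.List.mem_sorted, PySem.Set.mem_ofList, ← List.map_tail, List.zip_map,
        List.map_map, List.mem_map] at hx
      obtain ⟨q, hq, rfl⟩ := hx
      have hq' : (q.1, q.2) ∈ List.zip (pvChain n d r) (pvChain n d r).tail := by simpa using hq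
      obtain ⟨ha, hb, hab, hno⟩ :=
        (mem_zip_tail_iff _ (pairwise_pvChain n d r) q.1 q.2).mp hq'
      rw [mem_pvChain] at ha hb
      have hdvd : d ∣ q.2 - q.1 := hcong _ _ (ha.2.2.trans hb.2.2.symm)
      have hge : d ≤ q.2 - q.1 := Int.le_of_dvd (by omega) hdvd
      have heq : q.2 = q.1 + d := by
        by_contra hne
        have hlt : q.1 + d < q.2 := by omega
        have hxmem : q.1 + d ∈ pvChain n d r :=
          (mem_pvChain n d r _).mpr ⟨by omega, by omega, by rw [hmodshift]; exact ha.2.2⟩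
        exact hno _ hxmem ⟨by omega, hlt⟩
      refine ⟨q.1, ha.1, by omega, ?_⟩
      simp only [Function.comp, Prod.map]
      rw [heq]
  · rintro ⟨i, h0, hlt, rfl⟩
    right
    refine ⟨(PySem.Int.mod (i + 1) d,
        (pvChain n d (PySem.Int.mod (i + 1) d)).map (fun j => PySem.List.pyGetD cs j 'x')),
      List.mem_map.mpr ⟨PySem.Int.mod (i + 1) d, ?_, rfl⟩, ?_⟩
    · exact PySem.List.mem_pyRange_one.mpr ⟨PySem.Int.mod_nonneg _ hd, PySem.Int.mod_lt _ hd⟩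
    · rw [hz, PySem.List.mem_sorted, PySem.Set.mem_ofList, ← List.map_tail, List.zip_map,
        List.map_map, List.mem_map]
      refine ⟨(i, i + d), ?_, by simp [Prod.map]⟩
      apply (mem_zip_tail_iff _ (pairwise_pvChain n d _) i (i + d)).mpr
      refine ⟨(mem_pvChain n d _ i).mpr ⟨h0, by omega, rfl⟩,
        (mem_pvChain n d _ (i + d)).mpr ⟨by omega, by omega, by rw [hmodshift]⟩, by omega, ?_⟩
      intro y hy hyb
      rw [mem_pvChain] at hy
      have hdvd2 : d ∣ y - i := hcong _ _ hy.2.2.symm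
      have := Int.le_of_dvd (by omega) hdvd2
      omega

-- ===== VERDICT (by name: the statement is the Claim_ definition above) =====
theorem d_set_spec : Claim_equal_d_set := by
  intro s d _ hpre
  unfold Spec_d_set
  by_cases hd0 : d = 0
  · subst hd0
    simp [d_set, d_set_alt, PySem.List.slice_to_neg_one, PySem.List.slice_from_one,
      zip_dropLast_tail]
  · by_cases hdp : 0 < d
    · rw [d_set]
      simp only [dif_neg hd0]
      rw [d_set_alt]
      simp only [if_pos hd0, ne_eq]
      apply PySem.List.sorted_eq_sorted_of_perm _ _ _ (fun a b h => h)
      apply (List.perm_ext_iff_of_nodup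
        (nodup_foldl_union _ _ _ (by simp [PySem.Set.empty]))
        (PySem.Set.nodup_ofList _)).mpr
      intro x
      rw [PySem.Set.mem_ofList]
      exact (mem_A_set s.toList d hdp x).trans (mem_B_pairs s.toList d hdp x).symm
    · have hs : s = "" := by
        rcases hpre with h | h
        · omega
        · exact h
      subst hs
      have hdle : d ≤ 0 := by omega
      simp [d_set, d_set_alt, hd0, PySem.List.pyRange_one_eq_nil hdle, PySem.Dict.empty,
        PySem.Set.empty, PySem.List.slice]
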